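-- pv_equiv track=rewrite | github.com/musram/python_progs | practice/count_submatrices.py | count_more_than_one
-- ===== SOURCE A (Python) =====
-- def count_more_than_one(matrix):
--
--     m = len(matrix)
--     n  = len(matrix[0])
--
--     c = 0
--
--
--     while m >1 and n >1:
--         for i in range(m-1):
--             for j in range(n-1):
--                 if matrix[i][j] == 0 or matrix[i][j+1] == 0 or matrix[i+1][j] ==  0 or matrix[i+1][j+1] == 0:
--                     matrix[i][j] = 0
--                 else:
--                     c += 1
--         m -= 1
--         n -= 1
--
--     return c
-- ===== SOURCE B (Python) =====
-- def count_more_than_one(matrix):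
--     # O(m*n) largest-square DP (top-left anchored, rows processed bottom-up);
--     # unlike A it does not mutate its argument.
--     m = len(matrix)
--     n = len(matrix[0])
--     if m < 2 or n < 2:
--         return 0
--     total = 0
--     below = [0] * n
--     for row in reversed(matrix):
--         cur = [0] * n
--         for j in range(n - 1, -1, -1):
--             if row[j] != 0:
--                 if j == n - 1:
--                     cur[j] = 1
--                 else:
--                     cur[j] = 1 + min(below[j], below[j + 1], cur[j + 1])
--         total += sum(v - 1 for v in cur if v > 1)
--         below = cur
--     return total
-- ===== Notes on version B (the rewrite author's own statement) =====
-- stated objective: faster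
-- what changed: A repeatedly shrinks the matrix, re-scanning all cells once per square size (and mutates its argument); B makes a single bottom-up largest-square DP pass (min of three neighbours + 1) and sums max(side-1,0) over all cells, without mutating the input.
-- outside the precondition, e.g. on count_more_than_one([[0, 0], [0]]): A returns 0, B raises IndexError
import Mathlib
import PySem

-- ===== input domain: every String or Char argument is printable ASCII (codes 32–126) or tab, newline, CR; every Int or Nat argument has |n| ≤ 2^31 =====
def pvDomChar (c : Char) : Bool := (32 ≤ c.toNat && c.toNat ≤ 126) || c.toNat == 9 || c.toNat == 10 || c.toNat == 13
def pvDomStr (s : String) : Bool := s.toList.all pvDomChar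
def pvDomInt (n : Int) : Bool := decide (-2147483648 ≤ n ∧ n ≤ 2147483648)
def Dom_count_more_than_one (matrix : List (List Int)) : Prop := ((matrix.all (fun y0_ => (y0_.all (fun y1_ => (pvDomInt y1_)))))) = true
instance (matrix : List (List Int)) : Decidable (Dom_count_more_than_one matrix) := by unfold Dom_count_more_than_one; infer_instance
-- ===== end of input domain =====

-- B replaces A's repeated shrink-and-rescan passes (one pass per square size) by a single
-- O(m*n) largest-square dynamic-programming sweep; equivalence is about the RETURN value only
-- (Python A zeroes cells of its argument in place, B does not mutate it).

-- ===== PORT A =====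
-- matrix[i][j] read (all reads A performs are in range on inputs admitted by Pre_)
def gC (M : List (List Int)) (i j : Nat) : Int := (M.getD i []).getD j 0

-- matrix[i][j] = 0
def setZ (M : List (List Int)) (i j : Nat) : List (List Int) :=
  M.set i ((M.getD i []).set j 0)

-- inner `for j in range(n-1)` loop, as the obvious index recursion
def jloopA (i jstop : Nat) (j : Nat) (st : List (List Int) × Int) : List (List Int) × Int :=
  if _h : j < jstop then
    let M := st.1
    if gC M i j = 0 ∨ gC M i (j+1) = 0 ∨ gC M (i+1) j = 0 ∨ gC M (i+1) (j+1) = 0 then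
      jloopA i jstop (j+1) (setZ M i j, st.2)
    else
      jloopA i jstop (j+1) (M, st.2 + 1)
  else st
termination_by jstop - j

-- outer `for i in range(m-1)` loop
def iloopA (istop jstop : Nat) (i : Nat) (st : List (List Int) × Int) : List (List Int) × Int :=
  if _h : i < istop then
    iloopA istop jstop (i+1) (jloopA i jstop 0 st)
  else st
termination_by istop - i

-- `while m > 1 and n > 1` loop (m, n decrease by 1 each pass)
def whileA (m n : Nat) (st : List (List Int) × Int) : List (List Int) × Int :=
  if _h : 1 < m ∧ 1 < n then
    whileA (m - 1) (n - 1) (iloopA (m - 1) (n - 1) 0 st)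
  else st
termination_by m

def count_more_than_one (matrix : List (List Int)) : Int :=
  (whileA matrix.length matrix.headI.length (matrix, 0)).2

-- ===== PORT B =====
-- inner `for j in range(n-1, -1, -1)` loop of Source B: builds cur back-to-front,
-- acc holds cur[j], cur[j+1], …, cur[n-1]
def curLoopB (row below : List Int) (n : Nat) : Nat → List Int → List Int
  | 0, acc => acc
  | j+1, acc =>
    let v : Int :=
      if row.getD j 0 ≠ 0 then
        if j = n - 1 then 1
        else 1 + min (below.getD j 0) (min (below.getD (j+1) 0) (acc.headD 0))
      else 0
    curLoopB row below n j (v :: acc)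

-- `sum(v - 1 for v in cur if v > 1)`
def rowSumB (cur : List Int) : Int :=
  cur.foldl (fun s v => if v > 1 then s + (v - 1) else s) 0

def count_more_than_one_alt (matrix : List (List Int)) : Int :=
  let m := matrix.length
  let n := matrix.headI.length
  if m < 2 ∨ n < 2 then 0
  else
    (matrix.reverse.foldl
      (fun (st : List Int × Int) row =>
        let cur := curLoopB row st.1 n n []
        (cur, st.2 + rowSumB cur))
      (List.replicate n (0 : Int), 0)).2

-- ===== PRECONDITION & SPEC =====
-- Pre_ excludes the empty matrix (A raises IndexError on matrix[0]) and, when the while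
-- loop runs (m > 1 and n > 1), matrices with a row shorter than the first row: on those A
-- raises IndexError on almost all contents (B also raises), except for accidental zero
-- patterns that short-circuit the reads, a ragged corner no one would specify.
def Pre_count_more_than_one (matrix : List (List Int)) : Prop :=
  matrix ≠ [] ∧
    (matrix.length ≤ 1 ∨ matrix.headI.length ≤ 1 ∨
      ∀ row ∈ matrix, matrix.headI.length ≤ row.length)

instance (matrix : List (List Int)) : Decidable (Pre_count_more_than_one matrix) := by
  unfold Pre_count_more_than_one; infer_instance

def pvWitness_count_more_than_one : List (List Int) := [[1, 1, 0], [1, 1, 1], [0, 1, 1]]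

def Spec_count_more_than_one (matrix : List (List Int)) (out : Int) : Prop := out = count_more_than_one_alt matrix
instance (matrix : List (List Int)) (out : Int) : Decidable (Spec_count_more_than_one matrix out) := by unfold Spec_count_more_than_one; infer_instance

-- ===== CLAIM (what is proved, stated in full; the proofs are below) =====
def Claim_equal_count_more_than_one : Prop := ∀ (matrix : List (List Int)), Dom_count_more_than_one matrix → Pre_count_more_than_one matrix → Spec_count_more_than_one matrix (count_more_than_one matrix)

-- ===== LEMMAS AND PROOFS =====

-- `fsq mat i j` = side of the largest all-nonzero square whose top-left corner is (i, j),
-- the common quantity both programs compute with.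
def fsq (mat : List (List Int)) (i j : Nat) : Nat :=
  if h : i < mat.length ∧ j < mat.headI.length ∧ gC mat i j ≠ 0 then
    1 + min (fsq mat (i+1) j) (min (fsq mat i (j+1)) (fsq mat (i+1) (j+1)))
  else 0
termination_by mat.length - i + (mat.headI.length - j)
decreasing_by all_goals omega

def ShapeOf (mat M : List (List Int)) : Prop :=
  M.length = mat.length ∧ ∀ i, (M.getD i []).length = (mat.getD i []).length

lemma getD_set {α : Type} (l : List α) (i : Nat) (a : α) (i' : Nat) (d : α) :
    (l.set i a).getD i' d = if i = i' ∧ i < l.length then a else l.getD i' d := by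
  simp [List.getD_eq_getElem?_getD, List.getElem?_set]
  split_ifs <;> simp_all <;> omega

lemma gC_setZ (M : List (List Int)) (i j i' j' : Nat) :
    gC (setZ M i j) i' j' =
      if i' = i ∧ j' = j ∧ i < M.length ∧ j < (M.getD i []).length then 0 else gC M i' j' := by
  unfold gC setZ
  rw [getD_set]
  split_ifs with h1 h2 h2 <;> try rfl
  · obtain ⟨hii, hil⟩ := h1
    rw [getD_set]
    split_ifs with h3
    · rfl
    · exfalso; exact h3 ⟨h2.2.1.symm, by omega⟩
  · obtain ⟨hii, hil⟩ := h1
    rw [getD_set]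
    split_ifs with h3
    · exfalso; exact h2 ⟨hii.symm, h3.1.symm, hil, by omega⟩
    · rw [hii]
  · exfalso; exact h1 ⟨h2.1.symm, h2.2.2.1⟩

lemma ShapeOf_setZ (mat M : List (List Int)) (i j : Nat) (h : ShapeOf mat M) :
    ShapeOf mat (setZ M i j) := by
  obtain ⟨h1, h2⟩ := h
  refine ⟨by simp [setZ, h1], fun i' => ?_⟩
  rw [setZ, getD_set]
  split_ifs with h3
  · rw [List.length_set, ← h3.1]; exact h2 i
  · exact h2 i'

lemma fsq_le_row (mat : List (List Int)) (i j : Nat) : fsq mat i j ≤ mat.length - i := by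
  fun_induction fsq with
  | case1 i j h ih1 ih2 ih3 =>
      have := h.1
      omega
  | case2 => omega

lemma fsq_le_col (mat : List (List Int)) (i j : Nat) : fsq mat i j ≤ mat.headI.length - j := by
  fun_induction fsq with
  | case1 i j h ih1 ih2 ih3 =>
      have := h.2.1
      omega
  | case2 => omega

lemma fsq_pos_iff (mat : List (List Int)) (i j : Nat) :
    1 ≤ fsq mat i j ↔ (i < mat.length ∧ j < mat.headI.length ∧ gC mat i j ≠ 0) := by
  rw [fsq]
  split_ifs with h <;> simp [h]

lemma fsq_succ_iff (mat : List (List Int)) (i j t : Nat) :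
    t + 2 ≤ fsq mat i j ↔
      (t + 1 ≤ fsq mat i j ∧ t + 1 ≤ fsq mat i (j+1) ∧
       t + 1 ≤ fsq mat (i+1) j ∧ t + 1 ≤ fsq mat (i+1) (j+1)) := by
  rw [fsq]
  split_ifs with h
  · constructor
    · intro hle
      have h1 : t + 1 ≤ min (fsq mat (i+1) j) (min (fsq mat i (j+1)) (fsq mat (i+1) (j+1))) := by omega
      rw [le_min_iff, le_min_iff] at h1
      omega
    · intro ⟨h1, h2, h3, h4⟩
      have : t + 1 ≤ min (fsq mat (i+1) j) (min (fsq mat i (j+1)) (fsq mat (i+1) (j+1))) := by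
        rw [le_min_iff, le_min_iff]; omega
      omega
  · simp

lemma rowSumB_cast (l : List Nat) :
    ∀ s : Int, (l.map (fun x : Nat => (x : Int))).foldl (fun s v => if v > 1 then s + (v - 1) else s) s
      = s + ((l.map (fun x => x - 1)).sum : Nat) := by
  induction l with
  | nil => intro s; simp
  | cons x xs ih =>
      intro s
      simp only [List.map_cons, List.foldl_cons, List.sum_cons]
      rw [ih]
      split_ifs with h <;> push_cast <;> omega

lemma getD_map_range (f : Nat → Int) (n j : Nat) :
    (((List.range n).map f).getD j 0) = if j < n then f j else 0 := by
  rw [List.getD_eq_getElem?_getD, List.getElem?_map]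
  split_ifs with h
  · rw [List.getElem?_range h]; rfl
  · rw [List.getElem?_eq_none (by simpa using h)]; rfl

lemma curLoopB_spec (mat : List (List Int)) (a : Nat) (ha : a < mat.length) :
    ∀ j, j ≤ mat.headI.length →
      curLoopB (mat.getD a []) ((List.range mat.headI.length).map (fun j' => (fsq mat (a+1) j' : Int)))
        mat.headI.length j
        ((List.range' j (mat.headI.length - j)).map (fun j' => (fsq mat a j' : Int)))
      = (List.range mat.headI.length).map (fun j' => (fsq mat a j' : Int)) := by
  intro j
  induction j with
  | zero => intro _; simp [curLoopB, List.range_eq_range']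
  | succ j ih =>
      intro hj
      set n := mat.headI.length with hn
      rw [curLoopB]
      have hjn : j < n := by omega
      have hstep : (fsq mat a j : Int) ::
          (List.range' (j+1) (n - (j+1))).map (fun j' => (fsq mat a j' : Int))
          = (List.range' j (n - j)).map (fun j' => (fsq mat a j' : Int)) := by
        have : n - j = (n - (j+1)) + 1 := by omega
        rw [this, List.range'_succ, List.map_cons]
      -- v = fsq mat a j
      have hv : (if (mat.getD a []).getD j 0 ≠ 0 then
          if j = n - 1 then (1 : Int)
          else 1 + min (((List.range n).map (fun j' => (fsq mat (a+1) j' : Int))).getD j 0)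
            (min (((List.range n).map (fun j' => (fsq mat (a+1) j' : Int))).getD (j+1) 0)
              ((((List.range' (j+1) (n - (j+1))).map (fun j' => (fsq mat a j' : Int)))).headD 0))
        else 0) = (fsq mat a j : Int) := by
        by_cases hz : (mat.getD a []).getD j 0 ≠ 0
        · rw [if_pos hz]
          have hfsq : fsq mat a j = 1 + min (fsq mat (a+1) j) (min (fsq mat a (j+1)) (fsq mat (a+1) (j+1))) := by
            rw [fsq]; rw [dif_pos ⟨ha, hjn, hz⟩]
          rw [getD_map_range, getD_map_range, if_pos hjn]
          by_cases hlast : j = n - 1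
          · rw [if_pos hlast]
            have hj1 : ¬ (j + 1 < n) := by omega
            have hz1 : fsq mat a (j+1) = 0 := by
              rw [fsq, dif_neg]; intro h; exact hj1 h.2.1
            rw [hfsq, hz1]
            simp
          · rw [if_neg hlast]
            have hj1 : j + 1 < n := by omega
            rw [if_pos hj1]
            have hhead : (((List.range' (j+1) (n - (j+1))).map (fun j' => (fsq mat a j' : Int)))).headD 0
                = (fsq mat a (j+1) : Int) := by
              have : n - (j+1) = (n - (j+1) - 1) + 1 := by omega
              rw [this, List.range'_succ, List.map_cons, List.headD_cons]
            rw [hhead, hfsq]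
            push_cast
            rw [min_comm ((fsq mat (a+1) (j+1) : Int)) ((fsq mat a (j+1) : Int))]
        · rw [if_neg hz]
          have : fsq mat a j = 0 := by
            rw [fsq, dif_neg]; intro h; exact hz h.2.2
          rw [this]; rfl
      rw [hv, hstep]
      exact ih (by omega)

lemma foldrB_spec (mat : List (List Int)) :
    ∀ rows a, mat.drop a = rows → a + rows.length = mat.length →
      rows.foldr (fun row (st : List Int × Int) =>
          let cur := curLoopB row st.1 mat.headI.length mat.headI.length []
          (cur, st.2 + rowSumB cur))
        (List.replicate mat.headI.length (0 : Int), 0)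
      = ((List.range mat.headI.length).map (fun j' => (fsq mat a j' : Int)),
         ((∑ i ∈ Finset.Ico a mat.length, ∑ j ∈ Finset.range mat.headI.length,
           (fsq mat i j - 1) : Nat) : Int)) := by
  intro rows
  induction rows with
  | nil =>
      intro a _ hlen
      simp only [List.length_nil, Nat.add_zero] at hlen
      subst hlen
      simp only [List.foldr_nil]
      rw [Prod.mk.injEq]
      constructor
      · have hz : ∀ j', (fsq mat mat.length j' : Int) = 0 := by
          intro j'
          rw [fsq, dif_neg (by omega)]
          rfl
        symm
        rw [List.eq_replicate_iff]
        refine ⟨by simp, ?_⟩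
        intro b hb
        simp only [List.mem_map] at hb
        obtain ⟨j', _, rfl⟩ := hb
        exact hz j'
      · simp
  | cons row rows' ih =>
      intro a hdrop hlen
      have ha : a < mat.length := by
        simp only [List.length_cons] at hlen; omega
      have hrow : mat.getD a [] = row := by
        have h0 : mat[a]? = some row := by
          have h := congrArg (fun l : List (List Int) => l[0]?) hdrop
          simpa using h
        rw [List.getD_eq_getElem?_getD, h0]; rfl
      have hdrop' : mat.drop (a+1) = rows' := by
        have h := congrArg List.tail hdrop
        simpa using h
      have hlen' : (a+1) + rows'.length = mat.length := by
        simp only [List.length_cons] at hlen; omega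
      have IH := ih (a+1) hdrop' hlen'
      simp only [List.foldr_cons, IH]
      have hcur : curLoopB row ((List.range mat.headI.length).map (fun j' => (fsq mat (a+1) j' : Int)))
            mat.headI.length mat.headI.length []
          = (List.range mat.headI.length).map (fun j' => (fsq mat a j' : Int)) := by
        have := curLoopB_spec mat a ha mat.headI.length (le_refl _)
        rw [hrow] at this
        simpa using this
      simp only [hcur]
      rw [Prod.mk.injEq]
      refine ⟨rfl, ?_⟩
      have hsum : rowSumB ((List.range mat.headI.length).map (fun j' => (fsq mat a j' : Int)))
          = ((∑ j ∈ Finset.range mat.headI.length, (fsq mat a j - 1) : Nat) : Int) := by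
        have hmm : (List.range mat.headI.length).map (fun j' => (fsq mat a j' : Int))
            = ((List.range mat.headI.length).map (fun j' => fsq mat a j')).map (fun x : Nat => (x : Int)) := by
          rw [List.map_map]; rfl
        rw [rowSumB, hmm, rowSumB_cast, List.map_map]
        have hls : ∀ (n : ℕ) (f : ℕ → ℕ), ((List.range n).map f).sum = ∑ j ∈ Finset.range n, f j := by
          intro n f
          induction n with
          | zero => simp
          | succ n ihn =>
              rw [List.range_succ, List.map_append, List.sum_append, Finset.sum_range_succ, ihn]
              simp
        rw [hls]
        simp [Function.comp]
      rw [hsum]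
      have hsplit : (∑ i ∈ Finset.Ico a mat.length, ∑ j ∈ Finset.range mat.headI.length, (fsq mat i j - 1))
          = (∑ j ∈ Finset.range mat.headI.length, (fsq mat a j - 1))
            + ∑ i ∈ Finset.Ico (a+1) mat.length, ∑ j ∈ Finset.range mat.headI.length, (fsq mat i j - 1) := by
        exact Finset.sum_eq_sum_Ico_succ_bot ha _
      rw [hsplit]
      push_cast
      ring

set_option maxHeartbeats 1600000 in
lemma jloopA_spec (mat : List (List Int)) (t i jstop : Nat)
    (hstop : jstop = mat.headI.length - t - 1)
    (hi : i + t + 1 < mat.length)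
    (hrows : ∀ i' < mat.length, mat.headI.length ≤ (mat.getD i' []).length) :
    ∀ k j (P : List (List Int)) (c : Int), jstop ≤ j + k →
      ShapeOf mat P →
      (∀ j', j ≤ j' → j' + t < mat.headI.length → (gC P i j' ≠ 0 ↔ t + 1 ≤ fsq mat i j')) →
      (∀ j', j' + t < mat.headI.length → (gC P (i+1) j' ≠ 0 ↔ t + 1 ≤ fsq mat (i+1) j')) →
      ∃ Q, jloopA i jstop j (P, c)
            = (Q, c + (((Finset.Ico j jstop).filter (fun j' => t + 2 ≤ fsq mat i j')).card : Int))
        ∧ ShapeOf mat Q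
        ∧ (∀ j', gC Q i j' = if j ≤ j' ∧ j' < jstop ∧ fsq mat i j' ≤ t + 1 then 0 else gC P i j')
        ∧ (∀ i' j', i' ≠ i → gC Q i' j' = gC P i' j') := by
  intro k
  induction k with
  | zero =>
      intro j P c hk hShape _ _
      have hj : ¬ j < jstop := by omega
      refine ⟨P, ?_, hShape, ?_, fun _ _ _ => rfl⟩
      · rw [jloopA, dif_neg hj]
        rw [Finset.Ico_eq_empty (by omega)]
        simp
      · intro j'
        rw [if_neg (by omega)]
  | succ k ih =>
      intro j P c hk hShape Hcur Hbel
      by_cases hj : j < jstop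
      · have hn2 : t + 2 ≤ mat.headI.length := by omega
        have hjn : j + t < mat.headI.length := by omega
        have hj1n : (j+1) + t < mat.headI.length := by omega
        have hc0 := Hcur j (le_refl j) hjn
        have hc1 := Hcur (j+1) (by omega) hj1n
        have hb0 := Hbel j hjn
        have hb1 := Hbel (j+1) hj1n
        have hsucc := fsq_succ_iff mat i j t
        by_cases hF : t + 2 ≤ fsq mat i j
        · -- all four cells nonzero: count branch
          obtain ⟨f1, f2, f3, f4⟩ := hsucc.mp hF
          have hcond : ¬ (gC P i j = 0 ∨ gC P i (j+1) = 0 ∨ gC P (i+1) j = 0 ∨ gC P (i+1) (j+1) = 0) := by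
            push_neg
            exact ⟨hc0.mpr f1, hc1.mpr f2, hb0.mpr f3, hb1.mpr f4⟩
          have Hcur' : ∀ j', j + 1 ≤ j' → j' + t < mat.headI.length →
              (gC P i j' ≠ 0 ↔ t + 1 ≤ fsq mat i j') := fun j' h1 h2 => Hcur j' (by omega) h2
          obtain ⟨Q, heq, hQs, hQrow, hQoth⟩ := ih (j+1) P (c+1) (by omega) hShape Hcur' Hbel
          refine ⟨Q, ?_, hQs, ?_, hQoth⟩
          · rw [jloopA, dif_pos hj, if_neg hcond, heq]
            have hcard : ((Finset.Ico j jstop).filter (fun j' => t + 2 ≤ fsq mat i j')).card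
                = 1 + ((Finset.Ico (j+1) jstop).filter (fun j' => t + 2 ≤ fsq mat i j')).card := by
              rw [Finset.card_filter, Finset.card_filter, Finset.sum_eq_sum_Ico_succ_bot hj,
                if_pos hF]
            rw [hcard]
            push_cast
            ring_nf
          · intro j'
            rw [hQrow j']
            by_cases hjj : j' = j
            · subst hjj
              rw [if_neg (by omega), if_neg (by omega)]
            · by_cases hcnd : j + 1 ≤ j' ∧ j' < jstop ∧ fsq mat i j' ≤ t + 1
              · rw [if_pos hcnd, if_pos (by omega)]
              · rw [if_neg hcnd, if_neg (by omega)]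
        · -- some cell zero: zeroing branch
          have hcond : gC P i j = 0 ∨ gC P i (j+1) = 0 ∨ gC P (i+1) j = 0 ∨ gC P (i+1) (j+1) = 0 := by
            by_contra hno
            push_neg at hno
            exact hF (hsucc.mpr ⟨hc0.mp hno.1, hc1.mp hno.2.1, hb0.mp hno.2.2.1, hb1.mp hno.2.2.2⟩)
          have hilen : i < P.length := by rw [hShape.1]; omega
          have hjlen : j < (P.getD i []).length := by
            rw [hShape.2 i]
            have := hrows i (by omega)
            omega
          have hset : ∀ i' j', gC (setZ P i j) i' j' = if i' = i ∧ j' = j then 0 else gC P i' j' := by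
            intro i' j'
            rw [gC_setZ]
            by_cases h : i' = i ∧ j' = j
            · rw [if_pos ⟨h.1, h.2, hilen, hjlen⟩, if_pos h]
            · rw [if_neg (by tauto), if_neg h]
          have hShape' : ShapeOf mat (setZ P i j) := ShapeOf_setZ mat P i j hShape
          have Hcur' : ∀ j', j + 1 ≤ j' → j' + t < mat.headI.length →
              (gC (setZ P i j) i j' ≠ 0 ↔ t + 1 ≤ fsq mat i j') := by
            intro j' h1 h2
            rw [hset, if_neg (by omega)]
            exact Hcur j' (by omega) h2
          have Hbel' : ∀ j', j' + t < mat.headI.length →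
              (gC (setZ P i j) (i+1) j' ≠ 0 ↔ t + 1 ≤ fsq mat (i+1) j') := by
            intro j' h2
            rw [hset, if_neg (by omega)]
            exact Hbel j' h2
          obtain ⟨Q, heq, hQs, hQrow, hQoth⟩ := ih (j+1) (setZ P i j) c (by omega) hShape' Hcur' Hbel'
          refine ⟨Q, ?_, hQs, ?_, ?_⟩
          · rw [jloopA, dif_pos hj, if_pos hcond, heq]
            have hcard : ((Finset.Ico j jstop).filter (fun j' => t + 2 ≤ fsq mat i j')).card
                = ((Finset.Ico (j+1) jstop).filter (fun j' => t + 2 ≤ fsq mat i j')).card := by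
              rw [Finset.card_filter, Finset.card_filter, Finset.sum_eq_sum_Ico_succ_bot hj,
                if_neg hF, Nat.zero_add]
            rw [hcard]
          · intro j'
            rw [hQrow j', hset]
            by_cases hjj : j' = j
            · subst hjj
              rw [if_neg (by omega), if_pos ⟨rfl, rfl⟩, if_pos (by omega)]
            · rw [if_neg (show ¬(i = i ∧ j' = j) from fun h => hjj h.2)]
              by_cases hcnd : j + 1 ≤ j' ∧ j' < jstop ∧ fsq mat i j' ≤ t + 1
              · rw [if_pos hcnd, if_pos (by omega)]
              · rw [if_neg hcnd, if_neg (by omega)]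
          · intro i' j' hii
            rw [hQoth i' j' hii, hset, if_neg (show ¬(i' = i ∧ j' = j) from fun h => hii h.1)]
      · refine ⟨P, ?_, hShape, ?_, fun _ _ _ => rfl⟩
        · rw [jloopA, dif_neg hj]
          rw [Finset.Ico_eq_empty (by omega)]
          simp
        · intro j'
          rw [if_neg (by omega)]

set_option maxHeartbeats 1600000 in
lemma iloopA_spec (mat : List (List Int)) (t istop jstop : Nat)
    (histop : istop = mat.length - t - 1)
    (hjstop : jstop = mat.headI.length - t - 1)
    (hm : t + 1 < mat.length)
    (hrows : ∀ i' < mat.length, mat.headI.length ≤ (mat.getD i' []).length) :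
    ∀ k i (P : List (List Int)) (c : Int), istop ≤ i + k →
      ShapeOf mat P →
      (∀ i' j', i' < i → i' + t + 1 < mat.length → j' + t + 1 < mat.headI.length →
        (gC P i' j' ≠ 0 ↔ t + 2 ≤ fsq mat i' j')) →
      (∀ i' j', i ≤ i' → i' + t < mat.length → j' + t < mat.headI.length →
        (gC P i' j' ≠ 0 ↔ t + 1 ≤ fsq mat i' j')) →
      ∃ Q, iloopA istop jstop i (P, c)
            = (Q, c + ((∑ i' ∈ Finset.Ico i istop,
                ((Finset.Ico 0 jstop).filter (fun j' => t + 2 ≤ fsq mat i' j')).card : Nat) : Int))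
        ∧ ShapeOf mat Q
        ∧ (∀ i' j', i' + t + 1 < mat.length → j' + t + 1 < mat.headI.length →
            (gC Q i' j' ≠ 0 ↔ t + 2 ≤ fsq mat i' j')) := by
  intro k
  induction k with
  | zero =>
      intro i P c hk hShape Hdone _
      have hi2 : ¬ i < istop := by omega
      refine ⟨P, ?_, hShape, ?_⟩
      · rw [iloopA, dif_neg hi2, Finset.Ico_eq_empty (by omega)]
        simp
      · intro i' j' h1 h2
        exact Hdone i' j' (by omega) h1 h2
  | succ k ih =>
      intro i P c hk hShape Hdone Hrest
      by_cases hi2 : i < istop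
      · have hicell : i + t + 1 < mat.length := by omega
        obtain ⟨Q1, heq1, hQ1s, hQ1row, hQ1oth⟩ :=
          jloopA_spec mat t i jstop hjstop hicell hrows jstop 0 P c (by omega) hShape
            (fun j' _ h2 => Hrest i j' (le_refl i) (by omega) h2)
            (fun j' h2 => Hrest (i+1) j' (by omega) (by omega) h2)
        have Hdone' : ∀ i' j', i' < i + 1 → i' + t + 1 < mat.length →
            j' + t + 1 < mat.headI.length → (gC Q1 i' j' ≠ 0 ↔ t + 2 ≤ fsq mat i' j') := by
          intro i' j' h1 h2 h3
          by_cases hii : i' = i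
          · subst hii
            rw [hQ1row j']
            by_cases hFle : fsq mat i' j' ≤ t + 1
            · rw [if_pos ⟨by omega, by omega, hFle⟩]
              simp
              omega
            · rw [if_neg (by omega)]
              have := Hrest i' j' (le_refl i') (by omega) (by omega)
              constructor
              · intro _; omega
              · intro _; exact this.mpr (by omega)
          · rw [hQ1oth i' j' hii]
            exact Hdone i' j' (by omega) h2 h3
        have Hrest' : ∀ i' j', i + 1 ≤ i' → i' + t < mat.length → j' + t < mat.headI.length →
            (gC Q1 i' j' ≠ 0 ↔ t + 1 ≤ fsq mat i' j') := by
          intro i' j' h1 h2 h3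
          rw [hQ1oth i' j' (by omega)]
          exact Hrest i' j' (by omega) h2 h3
        obtain ⟨Q, heq, hQs, hQinv⟩ := ih (i+1) Q1
          (c + (((Finset.Ico 0 jstop).filter (fun j' => t + 2 ≤ fsq mat i j')).card : Int))
          (by omega) hQ1s Hdone' Hrest'
        refine ⟨Q, ?_, hQs, hQinv⟩
        rw [iloopA, dif_pos hi2, heq1, heq]
        have hsum : (∑ i' ∈ Finset.Ico i istop,
              ((Finset.Ico 0 jstop).filter (fun j' => t + 2 ≤ fsq mat i' j')).card)
            = ((Finset.Ico 0 jstop).filter (fun j' => t + 2 ≤ fsq mat i j')).card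
              + ∑ i' ∈ Finset.Ico (i+1) istop,
                ((Finset.Ico 0 jstop).filter (fun j' => t + 2 ≤ fsq mat i' j')).card :=
          Finset.sum_eq_sum_Ico_succ_bot hi2 _
        rw [hsum]
        push_cast
        ring_nf
      · refine ⟨P, ?_, hShape, ?_⟩
        · rw [iloopA, dif_neg hi2, Finset.Ico_eq_empty (by omega)]
          simp
        · intro i' j' h1 h2
          exact Hdone i' j' (by omega) h1 h2

set_option maxHeartbeats 1600000 in
lemma whileA_spec (mat : List (List Int))
    (hrows : ∀ i' < mat.length, mat.headI.length ≤ (mat.getD i' []).length) :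
    ∀ k t (P : List (List Int)) (c : Int), mat.length - t ≤ k →
      ShapeOf mat P →
      (∀ i j, i + t < mat.length → j + t < mat.headI.length →
        (gC P i j ≠ 0 ↔ t + 1 ≤ fsq mat i j)) →
      (whileA (mat.length - t) (mat.headI.length - t) (P, c)).2
        = c + ((∑ i ∈ Finset.range mat.length, ∑ j ∈ Finset.range mat.headI.length,
            (fsq mat i j - 1 - t) : Nat) : Int) := by
  intro k
  induction k with
  | zero =>
      intro t P c hk _ _
      have hg : ¬ (1 < mat.length - t ∧ 1 < mat.headI.length - t) := by omega
      rw [whileA, dif_neg hg]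
      have hz : (∑ i ∈ Finset.range mat.length, ∑ j ∈ Finset.range mat.headI.length,
          (fsq mat i j - 1 - t)) = 0 := by
        apply Finset.sum_eq_zero
        intro i _
        apply Finset.sum_eq_zero
        intro j _
        have h1 := fsq_le_row mat i j
        omega
      rw [hz]
      simp
  | succ k ih =>
      intro t P c hk hShape Hinv
      by_cases hg : 1 < mat.length - t ∧ 1 < mat.headI.length - t
      · obtain ⟨Q, heq, hQs, hQinv⟩ :=
          iloopA_spec mat t (mat.length - t - 1) (mat.headI.length - t - 1) rfl rfl
            (by omega) hrows (mat.length - t - 1) 0 P c (by omega) hShape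
            (fun i' j' h _ _ => absurd h (by omega))
            (fun i' j' _ h2 h3 => Hinv i' j' h2 h3)
        rw [whileA, dif_pos hg, heq]
        have e1 : mat.length - t - 1 = mat.length - (t+1) := by omega
        have e2 : mat.headI.length - t - 1 = mat.headI.length - (t+1) := by omega
        rw [e1, e2]
        have hrec := ih (t+1) Q
          (c + ((∑ i' ∈ Finset.Ico 0 (mat.length - (t+1)),
            ((Finset.Ico 0 (mat.headI.length - (t+1))).filter
              (fun j' => t + 2 ≤ fsq mat i' j')).card : Nat) : Int))
          (by omega) hQs (by
            intro i j h2 h3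
            exact hQinv i j (by omega) (by omega))
        rw [hrec]
        -- arithmetic: N + Σ (F-1-(t+1)) = Σ (F-1-t)
        have hNi : ∀ i, (((Finset.Ico 0 (mat.headI.length - (t+1))).filter
              (fun j' => t + 2 ≤ fsq mat i j')).card : Nat)
            = ∑ j ∈ Finset.range mat.headI.length, (if t + 2 ≤ fsq mat i j then 1 else 0) := by
          intro i
          rw [Finset.card_filter, ← Finset.range_eq_Ico]
          apply Finset.sum_subset (by
            intro x hx
            simp only [Finset.mem_range] at *
            omega)
          intro j _ hnot
          have hle := fsq_le_col mat i j
          simp only [Finset.mem_range] at hnot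
          rw [if_neg (by omega)]
        have hNfull : (∑ i' ∈ Finset.Ico 0 (mat.length - (t+1)),
              (((Finset.Ico 0 (mat.headI.length - (t+1))).filter
                (fun j' => t + 2 ≤ fsq mat i' j')).card : Nat))
            = ∑ i ∈ Finset.range mat.length, ∑ j ∈ Finset.range mat.headI.length,
                (if t + 2 ≤ fsq mat i j then 1 else 0) := by
          rw [Finset.sum_congr rfl (fun i _ => hNi i), ← Finset.range_eq_Ico]
          apply Finset.sum_subset (by
            intro x hx
            simp only [Finset.mem_range] at *
            omega)
          intro i _ hnot
          apply Finset.sum_eq_zero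
          intro j _
          have hle := fsq_le_row mat i j
          simp only [Finset.mem_range] at hnot
          rw [if_neg (by omega)]
        have hsplit : (∑ i ∈ Finset.range mat.length, ∑ j ∈ Finset.range mat.headI.length,
              (fsq mat i j - 1 - t))
            = (∑ i ∈ Finset.range mat.length, ∑ j ∈ Finset.range mat.headI.length,
                (if t + 2 ≤ fsq mat i j then 1 else 0))
              + ∑ i ∈ Finset.range mat.length, ∑ j ∈ Finset.range mat.headI.length,
                  (fsq mat i j - 1 - (t+1)) := by
          rw [← Finset.sum_add_distrib]
          apply Finset.sum_congr rfl
          intro i _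
          rw [← Finset.sum_add_distrib]
          apply Finset.sum_congr rfl
          intro j _
          split_ifs <;> omega
        rw [hsplit, hNfull]
        push_cast
        ring_nf
      · rw [whileA, dif_neg hg]
        have hz : (∑ i ∈ Finset.range mat.length, ∑ j ∈ Finset.range mat.headI.length,
            (fsq mat i j - 1 - t)) = 0 := by
          apply Finset.sum_eq_zero
          intro i _
          apply Finset.sum_eq_zero
          intro j _
          have h1 := fsq_le_row mat i j
          have h2 := fsq_le_col mat i j
          omega
        rw [hz]
        simp

-- ===== VERDICT (by name: the statement is the Claim_ definition above) =====
theorem count_more_than_one_spec : Claim_equal_count_more_than_one := by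
  unfold Claim_equal_count_more_than_one
  intro matrix _ hpre
  unfold Spec_count_more_than_one count_more_than_one count_more_than_one_alt
  obtain ⟨hne, hdisj⟩ := hpre
  by_cases hsmall : matrix.length < 2 ∨ matrix.headI.length < 2
  · rw [if_pos hsmall, whileA, dif_neg (by omega)]
  · rw [if_neg hsmall]
    push_neg at hsmall
    have hm2 : 2 ≤ matrix.length := hsmall.1
    have hn2 : 2 ≤ matrix.headI.length := hsmall.2
    have hrows : ∀ i' < matrix.length, matrix.headI.length ≤ (matrix.getD i' []).length := by
      intro i' hi'
      rcases hdisj with h | h | h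
      · omega
      · omega
      · have hmem : matrix.getD i' [] ∈ matrix := by
          rw [List.getD_eq_getElem?_getD, List.getElem?_eq_getElem hi']
          exact List.getElem_mem hi'
        exact h _ hmem
    have hinv0 : ∀ i j, i + 0 < matrix.length → j + 0 < matrix.headI.length →
        (gC matrix i j ≠ 0 ↔ 0 + 1 ≤ fsq matrix i j) := by
      intro i j hij hjj
      rw [fsq_pos_iff]
      constructor
      · intro h; exact ⟨by omega, by omega, h⟩
      · intro h; exact h.2.2
    have hA := whileA_spec matrix hrows matrix.length 0 matrix 0 (by omega)
      ⟨rfl, fun _ => rfl⟩ hinv0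
    simp only [Nat.sub_zero] at hA
    rw [hA]
    have hB := foldrB_spec matrix matrix 0 List.drop_zero (by omega)
    rw [List.foldl_reverse]
    rw [hB]
    simp only [zero_add, Finset.range_eq_Ico]
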